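-- pv_equiv track=rewrite | github.com/Beltaalfa/applyfy | applyfy_screens.py | api_path_to_screen_id
-- ===== SOURCE A (Python) =====
-- _API_PREFIX_TO_SCREEN_RAW: tuple[tuple[str, str], ...] = (
--     ("/api/gateway/transactions", "/transacoes"),
--     ("/api/gateway/producers", "/produtores"),
--     ("/api/gateway/producer", "/produtores"),
--     ("/api/financeiro", "/financeiro"),
--     ("/api/job-vendas", "/"),
--     ("/api/job", "/"),
--     ("/api/comercial", "/comercial"),
--     ("/api/hub/applyfy-commercial-users", "/comercial"),
--     ("/api/vendas/log", "/"),
--     ("/api/vendas-log", "/"),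
--     ("/api/vendas/import-log", "/"),
--     ("/api/vendas-import-log", "/"),
--     ("/api/vendas", "/"),
--     ("/api/transacoes", "/transacoes"),
--     ("/api/evolucao", "/evolucao"),
--     ("/api/dashboard", "/dashboard"),
--     ("/api/produtores-webhook", "/produtores"),
--     ("/api/produtor", "/produtores"),
--     ("/api/produtores", "/produtores"),
--     ("/api/log", "/log"),
--     ("/api/relatorio", "/"),
--     ("/api/ultimo-relatorio", "/"),
--     ("/api/exportar", "/"),
--     ("/api/datas", "/"),
--     ("/api/settings", "/"),
--     ("/api/integracao-status", "/"),
-- )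
--
-- def _sorted_api_prefixes() -> list[tuple[str, str]]:
--     return sorted(_API_PREFIX_TO_SCREEN_RAW, key=lambda x: len(x[0]), reverse=True)
--
-- def normalize_applyfy_path(path: str) -> str:
--     p = (path.split("?")[0] or "/").strip()
--     if len(p) > 1 and p.endswith("/"):
--         p = p[:-1]
--     if p == "/index.html" or p.endswith("/index.html"):
--         return "/"
--     if p == "/vendas.html" or p.endswith("/vendas.html"):
--         return "/vendas"
--     if p == "/evolucao.html" or p.endswith("/evolucao.html"):
--         return "/evolucao"
--     if p == "/dashboard.html" or p.endswith("/dashboard.html"):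
--         return "/dashboard"
--     return p or "/"
--
-- def api_path_to_screen_id(api_path: str) -> str | None:
--     p = normalize_applyfy_path(api_path)
--     for prefix, screen_id in _sorted_api_prefixes():
--         if p == prefix or p.startswith(prefix + "/"):
--             return screen_id
--     if p.startswith("/api/"):
--         return "/"
--     return None
-- ===== SOURCE B (Python) =====
-- _SCREENS = ("/", "/transacoes", "/produtores", "/financeiro",
--             "/comercial", "/evolucao", "/dashboard", "/log")
--
-- # screen index by the path segment(s) after "/api/"; same declaration order as the raw table
-- _API_SUFFIX_SCREEN = {
--     "gateway/transactions": 1,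
--     "gateway/producers": 2,
--     "gateway/producer": 2,
--     "financeiro": 3,
--     "job-vendas": 0,
--     "job": 0,
--     "comercial": 4,
--     "hub/applyfy-commercial-users": 4,
--     "vendas/log": 0,
--     "vendas-log": 0,
--     "vendas/import-log": 0,
--     "vendas-import-log": 0,
--     "vendas": 0,
--     "transacoes": 1,
--     "evolucao": 5,
--     "dashboard": 6,
--     "produtores-webhook": 2,
--     "produtor": 2,
--     "produtores": 2,
--     "log": 7,
--     "relatorio": 0,
--     "ultimo-relatorio": 0,
--     "exportar": 0,
--     "datas": 0,
--     "settings": 0,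
--     "integracao-status": 0,
-- }
--
-- _HTML_RULES = (("/index.html", "/"), ("/vendas.html", "/vendas"),
--                ("/evolucao.html", "/evolucao"), ("/dashboard.html", "/dashboard"))
--
--
-- def _norm(path):
--     p = (path.split("?")[0] or "/").strip()
--     if p.endswith("/") and p != "/":
--         p = p[:-1]
--     for suf, out in _HTML_RULES:
--         if p.endswith(suf):
--             return out
--     return p if p else "/"
--
--
-- def api_path_to_screen_id(api_path):
--     p = _norm(api_path)
--     if not p.startswith("/api/"):
--         return None
--     rest = p[5:]
--     # candidate cut points: slash boundaries of rest, longest first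
--     cuts = [len(rest)] + [i for i in range(len(rest) - 1, -1, -1) if rest[i] == "/"]
--     for cut in cuts:
--         idx = _API_SUFFIX_SCREEN.get(rest[:cut])
--         if idx is not None:
--             return _SCREENS[idx]
--     return "/"
-- ===== Notes on version B (the rewrite author's own statement) =====
-- stated objective: alternative
-- what changed: Instead of sorting the prefix table by length and scanning it for the first match, B walks the slash-boundary prefixes of the path itself (longest first) and looks each one up in a dict keyed by the segment(s) after '/api/', with screens stored once in a small tuple; the trailing-slash and *.html normalization is data-driven instead of an if-chain.
import Mathlib
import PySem

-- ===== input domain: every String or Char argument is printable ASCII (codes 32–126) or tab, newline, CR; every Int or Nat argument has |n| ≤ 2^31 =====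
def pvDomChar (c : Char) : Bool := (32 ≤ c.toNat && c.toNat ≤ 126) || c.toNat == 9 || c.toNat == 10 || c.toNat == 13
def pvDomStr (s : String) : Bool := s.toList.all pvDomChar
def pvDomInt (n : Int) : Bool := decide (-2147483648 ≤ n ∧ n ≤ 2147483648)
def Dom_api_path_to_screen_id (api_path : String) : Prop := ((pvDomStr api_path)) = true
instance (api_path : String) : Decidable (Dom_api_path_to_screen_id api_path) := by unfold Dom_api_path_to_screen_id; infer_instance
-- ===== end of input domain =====

-- B replaces A's sort-the-prefix-table-then-first-match with a walk over the slash-boundary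
-- prefixes of the path itself (longest first) against a dict keyed by the segment(s) after
-- "/api/" (objective: alternative — table-driven lookup by path segments, no sorting step).

-- ===== PORT A =====

-- module constant _API_PREFIX_TO_SCREEN_RAW
def pvRawTable : List (String × String) :=
  [ ("/api/gateway/transactions", "/transacoes"),
    ("/api/gateway/producers", "/produtores"),
    ("/api/gateway/producer", "/produtores"),
    ("/api/financeiro", "/financeiro"),
    ("/api/job-vendas", "/"),
    ("/api/job", "/"),
    ("/api/comercial", "/comercial"),
    ("/api/hub/applyfy-commercial-users", "/comercial"),
    ("/api/vendas/log", "/"),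
    ("/api/vendas-log", "/"),
    ("/api/vendas/import-log", "/"),
    ("/api/vendas-import-log", "/"),
    ("/api/vendas", "/"),
    ("/api/transacoes", "/transacoes"),
    ("/api/evolucao", "/evolucao"),
    ("/api/dashboard", "/dashboard"),
    ("/api/produtores-webhook", "/produtores"),
    ("/api/produtor", "/produtores"),
    ("/api/produtores", "/produtores"),
    ("/api/log", "/log"),
    ("/api/relatorio", "/"),
    ("/api/ultimo-relatorio", "/"),
    ("/api/exportar", "/"),
    ("/api/datas", "/"),
    ("/api/settings", "/"),
    ("/api/integracao-status", "/") ]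

-- helper normalize_applyfy_path as A's module defines it
def normalize_applyfy_path (path : String) : String :=
  -- path.split("?")[0]: the separator "?" is nonempty, so split? is `some` of a nonempty list;
  -- getD/headD only discharge those impossible cases
  let s0 := ((PySem.Str.split? path "?").getD [path]).headD path
  let p0 := PySem.Str.strip (if s0 == "" then "/" else s0)
  let p1 := if decide (1 < PySem.Str.len p0) && PySem.Str.endswith p0 "/" then
              PySem.Str.slice p0 none (some (-1)) else p0
  if p1 == "/index.html" || PySem.Str.endswith p1 "/index.html" then "/"
  else if p1 == "/vendas.html" || PySem.Str.endswith p1 "/vendas.html" then "/vendas"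
  else if p1 == "/evolucao.html" || PySem.Str.endswith p1 "/evolucao.html" then "/evolucao"
  else if p1 == "/dashboard.html" || PySem.Str.endswith p1 "/dashboard.html" then "/dashboard"
  else if p1 == "" then "/" else p1

-- the loop condition `p == prefix or p.startswith(prefix + "/")`
def pvMatch (p pre : String) : Bool :=
  p == pre || PySem.Str.startswith p (pre ++ "/")

-- _sorted_api_prefixes()
def pvSortedApiPrefixes : List (String × String) :=
  PySem.List.sorted pvRawTable (fun x => PySem.Str.len x.1) true

-- the for-loop of A: first match wins
def pvFirstMatch (p : String) : List (String × String) → Option String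
  | [] => none
  | e :: rest => if pvMatch p e.1 then some e.2 else pvFirstMatch p rest

def api_path_to_screen_id (api_path : String) : Option String :=
  let p := normalize_applyfy_path api_path
  match pvFirstMatch p pvSortedApiPrefixes with
  | some sid => some sid
  | none => if PySem.Str.startswith p "/api/" then some "/" else none

-- ===== PORT B =====

-- module constant _SCREENS
def pvScreens : List String :=
  ["/", "/transacoes", "/produtores", "/financeiro", "/comercial", "/evolucao", "/dashboard", "/log"]

-- module constant _API_SUFFIX_SCREEN (dict literal, distinct keys, insertion order)
def pvSuffixItems : List (String × Int) :=
  [ ("gateway/transactions", 1),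
    ("gateway/producers", 2),
    ("gateway/producer", 2),
    ("financeiro", 3),
    ("job-vendas", 0),
    ("job", 0),
    ("comercial", 4),
    ("hub/applyfy-commercial-users", 4),
    ("vendas/log", 0),
    ("vendas-log", 0),
    ("vendas/import-log", 0),
    ("vendas-import-log", 0),
    ("vendas", 0),
    ("transacoes", 1),
    ("evolucao", 5),
    ("dashboard", 6),
    ("produtores-webhook", 2),
    ("produtor", 2),
    ("produtores", 2),
    ("log", 7),
    ("relatorio", 0),
    ("ultimo-relatorio", 0),
    ("exportar", 0),
    ("datas", 0),
    ("settings", 0),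
    ("integracao-status", 0) ]

def pvSuffixScreen : PySem.Dict String Int := PySem.Dict.mk pvSuffixItems

-- module constant _HTML_RULES
def pvHtmlRules : List (String × String) :=
  [("/index.html", "/"), ("/vendas.html", "/vendas"),
   ("/evolucao.html", "/evolucao"), ("/dashboard.html", "/dashboard")]

-- the for-loop of B's helper _norm
def pvSufLoop (p : String) : List (String × String) → Option String
  | [] => none
  | e :: t => if PySem.Str.endswith p e.1 then some e.2 else pvSufLoop p t

-- B's helper _norm
def pvNormB (path : String) : String :=
  -- path.split("?")[0]: "?" is nonempty so split? is `some` of a nonempty list; getD/headD discharge that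
  let s0 := ((PySem.Str.split? path "?").getD [path]).headD path
  let p0 := PySem.Str.strip (if s0 == "" then "/" else s0)
  let p1 := if PySem.Str.endswith p0 "/" && !(p0 == "/") then
              PySem.Str.slice p0 none (some (-1)) else p0
  match pvSufLoop p1 pvHtmlRules with
  | some out => out
  | none => if p1 == "" then "/" else p1

-- B's for-loop over candidate cut points: first dict hit wins
-- (_SCREENS[idx]: every idx stored in the dict is 0..7, inside _SCREENS, so pyGetD's default is never read)
def pvCutLoop (rest : String) : List Int → Option String
  | [] => none
  | c :: t =>
    match PySem.Dict.get? pvSuffixScreen (PySem.Str.slice rest none (some c)) with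
    | some idx => some (PySem.List.pyGetD pvScreens idx "")
    | none => pvCutLoop rest t

def api_path_to_screen_id_alt (api_path : String) : Option String :=
  let p := pvNormB api_path
  if PySem.Str.startswith p "/api/" then
    let rest := PySem.Str.slice p (some 5) none
    -- [len(rest)] + [i for i in range(len(rest)-1, -1, -1) if rest[i] == "/"]
    -- (rest[i] == "/": index i is in range inside the comprehension, so pyGet? is `some`;
    --  the comparison with the one-char string "/" is the char comparison)
    let cuts : List Int :=
      PySem.Str.len rest ::
        (PySem.List.pyRange (PySem.Str.len rest - 1) (-1) (-1)).filter
          (fun i => PySem.Str.pyGet? rest i == some '/')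
    match pvCutLoop rest cuts with
    | some r => some r
    | none => some "/"
  else none

-- ===== PRECONDITION & SPEC =====
def Spec_api_path_to_screen_id (api_path : String) (out : Option String) : Prop := out = api_path_to_screen_id_alt api_path
instance (api_path : String) (out : Option String) : Decidable (Spec_api_path_to_screen_id api_path out) := by unfold Spec_api_path_to_screen_id; infer_instance

-- ===== CLAIM (what is proved, stated in full; the proofs are below) =====
def Claim_equal_api_path_to_screen_id : Prop := ∀ (api_path : String), Dom_api_path_to_screen_id api_path → Spec_api_path_to_screen_id api_path (api_path_to_screen_id api_path)

-- ===== LEMMAS AND PROOFS =====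

-- ---- normalization agreement ----

theorem pvCond_eq (q : String) :
    (decide (1 < PySem.Str.len q) && PySem.Str.endswith q "/")
      = (PySem.Str.endswith q "/" && !(q == "/")) := by
  by_cases he : PySem.Str.endswith q "/" = true
  · have hsuf : ['/'] <:+ q.toList := by
      have := (PySem.Chars.endswith_iff q.toList ("/" : String).toList).mp
        (by simpa [PySem.Str.endswith_eq] using he)
      simpa using this
    rw [he]
    simp only [Bool.and_true, Bool.true_and]
    by_cases h1 : 1 < q.toList.length
    · have hq : ¬ (q = "/") := by
        intro hq; subst hq; simp at h1
      have hb : (q == "/") = false := by simpa using hq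
      have hL : 1 < q.length := by rw [← String.length_toList]; exact h1
      simp [PySem.Str.len_eq, hL, hb]
    · have hlen : 1 ≤ q.toList.length := by simpa using hsuf.length_le
      have hl : q.toList.length = 1 := by omega
      have hls : q.toList = ['/'] := (hsuf.eq_of_length (by simpa using hl.symm)).symm
      have hq : q = "/" := by
        apply String.toList_inj.mp; simpa using hls
      subst hq
      simp [PySem.Str.len_eq]
  · have hef : PySem.Str.endswith q "/" = false := Bool.eq_false_iff.mpr he
    rw [hef]
    simp

theorem pvEqOrEnds (q suf : String) :
    (q == suf || PySem.Str.endswith q suf) = PySem.Str.endswith q suf := by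
  by_cases h : q == suf
  · have hq : q = suf := by simpa using h
    subst hq
    simp [PySem.Str.endswith_eq, PySem.Chars.endswith_iff]
  · simp [h]

theorem pvSufChain_eq (p1 : String) :
    (match pvSufLoop p1 pvHtmlRules with
     | some out => out
     | none => if p1 == "" then "/" else p1) =
    (if p1 == "/index.html" || PySem.Str.endswith p1 "/index.html" then "/"
     else if p1 == "/vendas.html" || PySem.Str.endswith p1 "/vendas.html" then "/vendas"
     else if p1 == "/evolucao.html" || PySem.Str.endswith p1 "/evolucao.html" then "/evolucao"
     else if p1 == "/dashboard.html" || PySem.Str.endswith p1 "/dashboard.html" then "/dashboard"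
     else if p1 == "" then "/" else p1) := by
  simp only [pvSufLoop, pvHtmlRules, pvEqOrEnds]
  split_ifs <;> simp_all

theorem pvNorm_eq (path : String) : pvNormB path = normalize_applyfy_path path := by
  unfold pvNormB normalize_applyfy_path
  simp only [pvCond_eq]
  rw [pvSufChain_eq]

-- ---- generic facts about A's loop ----

theorem pvMatch_prefix {p pre : String} (h : pvMatch p pre = true) :
    pre.toList <+: p.toList := by
  unfold pvMatch at h
  rcases Bool.or_eq_true_iff.mp h with h | h
  · rw [show p = pre from by simpa using h]
  · have h2 : (pre ++ "/").toList <+: p.toList :=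
      (PySem.Chars.startswith_iff _ _).mp (by simpa [PySem.Str.startswith_eq] using h)
    have h1 : pre.toList <+: (pre ++ "/").toList := by
      simp [List.prefix_append]
    exact h1.trans h2

theorem pvMatch_len_inj {p a b : String} (ha : pvMatch p a = true) (hb : pvMatch p b = true)
    (hl : PySem.Str.len a = PySem.Str.len b) : a = b := by
  have hl' : a.toList.length = b.toList.length := by
    have := hl
    simp only [PySem.Str.len_eq] at this
    exact_mod_cast this
  have hpre := List.prefix_of_prefix_length_le (pvMatch_prefix ha) (pvMatch_prefix hb) (le_of_eq hl')
  exact String.toList_inj.mp (hpre.eq_of_length hl')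

theorem pvFirstMatch_eq_none_iff (p : String) (L : List (String × String)) :
    pvFirstMatch p L = none ↔ ∀ e ∈ L, pvMatch p e.1 = false := by
  induction L with
  | nil => simp [pvFirstMatch]
  | cons e t ih =>
    by_cases h : pvMatch p e.1 = true
    · simp [pvFirstMatch, h]
    · simp [pvFirstMatch, h, ih]

-- on a length-descending list, the first match is a maximal match
theorem pvFirstMatch_max (p : String) (L : List (String × String))
    (hs : L.Pairwise (fun a b => PySem.Str.len b.1 ≤ PySem.Str.len a.1))
    (hex : ∃ e ∈ L, pvMatch p e.1 = true) :
    ∃ f ∈ L, pvMatch p f.1 = true ∧ pvFirstMatch p L = some f.2 ∧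
      ∀ g ∈ L, pvMatch p g.1 = true → PySem.Str.len g.1 ≤ PySem.Str.len f.1 := by
  induction L with
  | nil => simp at hex
  | cons x t ih =>
    rcases List.pairwise_cons.mp hs with ⟨hhead, htail⟩
    by_cases hx : pvMatch p x.1 = true
    · refine ⟨x, by simp, hx, by simp [pvFirstMatch, hx], ?_⟩
      intro g hg _
      rcases List.mem_cons.mp hg with rfl | hg'
      · exact le_refl _
      · exact hhead g hg'
    · have hex' : ∃ e ∈ t, pvMatch p e.1 = true := by
        rcases hex with ⟨e, he, hme⟩
        rcases List.mem_cons.mp he with rfl | he'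
        · exact absurd hme hx
        · exact ⟨e, he', hme⟩
      rcases ih htail hex' with ⟨f, hf, hmf, heq, hmax⟩
      refine ⟨f, by simp [hf], hmf, by simp [pvFirstMatch, hx, heq], ?_⟩
      intro g hg hmg
      rcases List.mem_cons.mp hg with rfl | hg'
      · exact absurd hmg hx
      · exact hmax g hg' hmg

-- ---- finite table facts ----

theorem pvNodupRaw : (pvRawTable.map Prod.fst).Nodup := by decide

theorem pvNodupSuffix : (pvSuffixItems.map Prod.fst).Nodup := by decide

-- the raw table is exactly the suffix dict rendered through _SCREENS
theorem pvCorr :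
    pvRawTable = pvSuffixItems.map
      (fun e => ("/api/" ++ e.1, PySem.List.pyGetD pvScreens e.2 "")) := by decide

theorem pvRaw_api (e : String × String) (he : e ∈ pvRawTable) :
    ("/api/" : String).toList <+: e.1.toList := by
  have hall : pvRawTable.all (fun e => PySem.Str.startswith e.1 "/api/") = true := by decide
  have h := List.all_eq_true.mp hall e he
  exact (PySem.Chars.startswith_iff _ _).mp (by simpa [PySem.Str.startswith_eq] using h)

-- ---- dict lookup on the literal table ----

theorem pvGet_unfold (s : String) :
    PySem.Dict.get? pvSuffixScreen s
      = (List.find? (fun e => e.1 == s) pvSuffixItems).map (·.2) := rfl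

theorem pvGet_eq_some_iff (s : String) (i : Int) :
    PySem.Dict.get? pvSuffixScreen s = some i ↔ (s, i) ∈ pvSuffixItems := by
  rw [pvGet_unfold]
  constructor
  · intro h
    rcases Option.map_eq_some_iff.mp h with ⟨e, hf, hei⟩
    have hmem := List.mem_of_find?_eq_some hf
    have hk : e.1 = s := by simpa using List.find?_some hf
    have : e = (s, i) := by
      cases e; simp_all
    rwa [← this]
  · intro hm
    cases hf : List.find? (fun e => e.1 == s) pvSuffixItems with
    | none =>
      have := List.find?_eq_none.mp hf (s, i) hm
      simp at this
    | some e =>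
      have hmem := List.mem_of_find?_eq_some hf
      have hk : e.1 = s := by simpa using List.find?_some hf
      have he : e = (s, i) := by
        have h1 : e.1 = (s, i).1 := hk
        exact List.inj_on_of_nodup_map pvNodupSuffix hmem hm h1
      simp [he]

-- ---- cut list characterization ----

theorem pvPyRange_pairwise (b : Int) : ∀ (n : Nat) (a : Int), (b - a).toNat = n →
    (PySem.List.pyRange a b 1).Pairwise (· < ·)
  | 0, a, h => by
    have hba : b ≤ a := by omega
    simp [PySem.List.pyRange_one_eq_nil hba]
  | (n+1), a, h => by
    have hab : a < b := by omega
    rw [PySem.List.pyRange_one_cons hab]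
    refine List.Pairwise.cons ?_ (pvPyRange_pairwise b n (a+1) (by omega))
    intro x hx
    have := (PySem.List.mem_pyRange_one.mp hx).1
    omega

theorem pvMem_cuts (rest : String) (c : Int) :
    (c ∈ (PySem.Str.len rest ::
        (PySem.List.pyRange (PySem.Str.len rest - 1) (-1) (-1)).filter
          (fun i => PySem.Str.pyGet? rest i == some '/'))) ↔
      (c = rest.toList.length ∨
        (∃ k : Nat, c = (k : Int) ∧ k < rest.toList.length ∧ rest.toList[k]? = some '/')) := by
  simp only [List.mem_cons, List.mem_filter, PySem.List.mem_pyRange_neg_one,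
    PySem.Str.len_eq]
  constructor
  · rintro (rfl | ⟨⟨h1, h2⟩, hc⟩)
    · left; rfl
    · right
      refine ⟨c.toNat, by omega, by omega, ?_⟩
      have h3 : PySem.Str.pyGet? rest c = some '/' := by simpa using hc
      rw [show c = ((c.toNat : Nat) : Int) by omega, PySem.Str.pyGet?_natCast] at h3
      exact h3
  · rintro (rfl | ⟨k, rfl, hk, hg⟩)
    · left; rfl
    · right
      refine ⟨⟨by omega, by omega⟩, ?_⟩
      simp [hg]

theorem pvCuts_sorted (rest : String) :
    (PySem.Str.len rest ::
        (PySem.List.pyRange (PySem.Str.len rest - 1) (-1) (-1)).filter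
          (fun i => PySem.Str.pyGet? rest i == some '/')).Pairwise (fun a b => b < a) := by
  refine List.Pairwise.cons ?_ ?_
  · intro x hx
    have := (PySem.List.mem_pyRange_neg_one.mp (List.mem_filter.mp hx).1).2
    simp only [PySem.Str.len_eq] at *
    omega
  · refine List.Pairwise.filter _ ?_
    rw [PySem.List.pyRange_neg_one_eq_reverse]
    rw [List.pairwise_reverse]
    have h0 : (-1 : Int) + 1 = 0 := by omega
    rw [h0]
    exact pvPyRange_pairwise _ (PySem.Str.len rest - 1 + 1 - 0).toNat 0 rfl

-- ---- cut loop characterization ----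

theorem pvCutLoop_none_iff (rest : String) (cs : List Int) :
    pvCutLoop rest cs = none ↔
      ∀ c ∈ cs, PySem.Dict.get? pvSuffixScreen (PySem.Str.slice rest none (some c)) = none := by
  induction cs with
  | nil => simp [pvCutLoop]
  | cons c t ih =>
    unfold pvCutLoop
    cases hg : PySem.Dict.get? pvSuffixScreen (PySem.Str.slice rest none (some c)) with
    | some i => simp [hg]
    | none => simpa [hg] using ih

theorem pvCutLoop_some (rest : String) (cs : List Int) (v : String)
    (hs : cs.Pairwise (fun a b => b < a))
    (h : pvCutLoop rest cs = some v) :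
    ∃ c ∈ cs, ∃ i, PySem.Dict.get? pvSuffixScreen (PySem.Str.slice rest none (some c)) = some i ∧
      v = PySem.List.pyGetD pvScreens i "" ∧
      ∀ c' ∈ cs, c < c' →
        PySem.Dict.get? pvSuffixScreen (PySem.Str.slice rest none (some c')) = none := by
  induction cs with
  | nil => simp [pvCutLoop] at h
  | cons c t ih =>
    rcases List.pairwise_cons.mp hs with ⟨hhead, htail⟩
    unfold pvCutLoop at h
    cases hg : PySem.Dict.get? pvSuffixScreen (PySem.Str.slice rest none (some c)) with
    | some i =>
      rw [hg] at h
      refine ⟨c, by simp, i, hg, by simpa using h.symm, ?_⟩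
      intro c' hc' hlt
      rcases List.mem_cons.mp hc' with rfl | hc''
      · omega
      · exact absurd (hhead c' hc'') (by omega)
    | none =>
      rw [hg] at h
      rcases ih htail h with ⟨c0, hc0, i, hgi, hv, hmax⟩
      refine ⟨c0, by simp [hc0], i, hgi, hv, ?_⟩
      intro c' hc' hlt
      rcases List.mem_cons.mp hc' with rfl | hc''
      · exact hg
      · exact hmax c' hc'' hlt

-- ---- the bridge between matches and cuts ----

-- under `p = "/api/" ++ rest`, a table key matches p iff its suffix is a slash-boundary prefix of rest
theorem pvMatch_iff_boundary (p rest s : String)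
    (hp : p.toList = ("/api/" : String).toList ++ rest.toList) :
    pvMatch p ("/api/" ++ s) = true ↔
      (rest.toList = s.toList ∨ s.toList ++ ['/'] <+: rest.toList) := by
  unfold pvMatch
  rw [Bool.or_eq_true_iff]
  constructor
  · rintro (h | h)
    · left
      have hps : p = "/api/" ++ s := by simpa using h
      have := congrArg String.toList hps
      rw [String.toList_append, hp] at this
      exact List.append_cancel_left this
    · right
      have hpre : ("/api/" ++ s ++ "/").toList <+: p.toList :=
        (PySem.Chars.startswith_iff _ _).mp (by simpa [PySem.Str.startswith_eq] using h)
      rw [String.toList_append, String.toList_append, hp, List.append_assoc] at hpre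
      have := (List.prefix_append_right_inj _).mp hpre
      simpa using this
  · rintro (h | h)
    · left
      have : p.toList = ("/api/" ++ s).toList := by
        rw [String.toList_append, hp, h]
      simpa using String.toList_inj.mp this
    · right
      rw [PySem.Str.startswith_eq]
      apply (PySem.Chars.startswith_iff _ _).mpr
      rw [String.toList_append, String.toList_append, hp, List.append_assoc]
      apply (List.prefix_append_right_inj _).mpr
      simpa using h

-- the slice at a cut point
theorem pvSlice_toList (rest : String) (c : Nat) :
    (PySem.Str.slice rest none (some (c : Int))).toList = rest.toList.take c := by
  simp [PySem.List.slice_to_natCast]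

-- ---- assembly helpers ----

theorem pvLenKey (s : String) :
    PySem.Str.len ("/api/" ++ s) = 5 + (s.toList.length : Int) := by
  have h5 : ("/api/" : String).toList.length = 5 := by decide
  simp only [PySem.Str.len_eq, String.toList_append, List.length_append, h5]
  push_cast
  ring

theorem pvBoundary_hit (rest s' : String) (i' : Int) (hm : (s', i') ∈ pvSuffixItems)
    (hb : rest.toList = s'.toList ∨ s'.toList ++ ['/'] <+: rest.toList) :
    ((s'.toList.length : Int) ∈ (PySem.Str.len rest ::
        (PySem.List.pyRange (PySem.Str.len rest - 1) (-1) (-1)).filter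
          (fun i => PySem.Str.pyGet? rest i == some '/'))) ∧
    PySem.Dict.get? pvSuffixScreen
        (PySem.Str.slice rest none (some (s'.toList.length : Int))) = some i' := by
  have hpre : s'.toList <+: rest.toList := by
    rcases hb with h | h
    · rw [h]
    · exact (List.prefix_append s'.toList ['/']).trans h
  have htake : rest.toList.take s'.toList.length = s'.toList :=
    (List.prefix_iff_eq_take.mp hpre).symm
  have hslice : PySem.Str.slice rest none (some (s'.toList.length : Int)) = s' := by
    apply String.toList_inj.mp
    rw [pvSlice_toList]
    exact htake
  refine ⟨?_, by rw [hslice]; exact (pvGet_eq_some_iff _ _).mpr hm⟩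
  apply (pvMem_cuts rest _).mpr
  rcases hb with h | h
  · left
    rw [h]
  · right
    refine ⟨s'.toList.length, rfl, ?_, ?_⟩
    · have := h.length_le
      simp only [List.length_append, List.length_cons, List.length_nil] at this
      omega
    · rcases h with ⟨t, ht⟩
      rw [← ht, List.append_assoc]
      rw [List.getElem?_append_right (le_refl _)]
      simp

theorem pvRaw_decomp (g : String × String) (hg : g ∈ pvRawTable) :
    ∃ s' i', (s', i') ∈ pvSuffixItems ∧
      g.1 = "/api/" ++ s' ∧ g.2 = PySem.List.pyGetD pvScreens i' "" := by
  rw [pvCorr] at hg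
  rcases List.mem_map.mp hg with ⟨e, he, heq⟩
  exact ⟨e.1, e.2, he, by rw [← heq], by rw [← heq]⟩

-- ---- the main tail lemma ----

set_option maxHeartbeats 4000000 in
theorem pvTail_eq (p : String) :
    (match pvFirstMatch p pvSortedApiPrefixes with
      | some sid => some sid
      | none => if PySem.Str.startswith p "/api/" then some "/" else none) =
    (if PySem.Str.startswith p "/api/" then
      let rest := PySem.Str.slice p (some 5) none
      let cuts : List Int :=
        PySem.Str.len rest ::
          (PySem.List.pyRange (PySem.Str.len rest - 1) (-1) (-1)).filter
            (fun i => PySem.Str.pyGet? rest i == some '/')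
      match pvCutLoop rest cuts with
      | some r => some r
      | none => some "/"
    else (none : Option String)) := by
  by_cases hst : PySem.Str.startswith p "/api/" = true
  · -- p starts with "/api/"
    have hpre5 : ("/api/" : String).toList <+: p.toList :=
      (PySem.Chars.startswith_iff _ _).mp (by simpa [PySem.Str.startswith_eq] using hst)
    have hslice5 : (PySem.Str.slice p (some 5) none).toList = p.toList.drop 5 := by
      have h := PySem.List.slice_from (xs := p.toList) (a := 5) (by norm_num)
      simp only [PySem.Str.slice] at *
      simpa using h
    have hp5 : p.toList = ("/api/" : String).toList ++ (PySem.Str.slice p (some 5) none).toList := by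
      rw [hslice5]
      rcases hpre5 with ⟨t, ht⟩
      rw [← ht]
      congr 1
    rw [hst]
    set rest := PySem.Str.slice p (some 5) none with hrestdef
    set cuts : List Int := PySem.Str.len rest ::
        (PySem.List.pyRange (PySem.Str.len rest - 1) (-1) (-1)).filter
          (fun i => PySem.Str.pyGet? rest i == some '/') with hcutsdef
    clear_value rest cuts
    cases hloop : pvCutLoop rest cuts with
    | none =>
      have hmiss := (pvCutLoop_none_iff rest cuts).mp hloop
      have hnone : pvFirstMatch p pvSortedApiPrefixes = none := by
        rw [pvFirstMatch_eq_none_iff]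
        intro g hg
        apply Bool.eq_false_iff.mpr
        intro hmg
        have hg' : g ∈ pvRawTable := (PySem.List.mem_sorted _ _ _ _).mp hg
        rcases pvRaw_decomp g hg' with ⟨s', i', hmem, hg1, _⟩
        have hb := (pvMatch_iff_boundary p rest s' hp5).mp (by rwa [hg1] at hmg)
        rcases pvBoundary_hit rest s' i' hmem hb with ⟨hc, hhit⟩
        have := hmiss _ (by rw [← hcutsdef] at hc; exact hc)
        rw [this] at hhit
        simp at hhit
      rw [hcutsdef] at hloop
      rw [hnone]
      simp only [hloop]
    | some v =>
      rcases pvCutLoop_some rest cuts v (by rw [hcutsdef]; exact pvCuts_sorted rest) hloop with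
        ⟨c, hc, i, hhit, hv, hmax⟩
      obtain ⟨k, hck, hkle, hbk⟩ :
          ∃ k : Nat, c = (k : Int) ∧ k ≤ rest.toList.length ∧
            (rest.toList = rest.toList.take k ∨
              rest.toList.take k ++ ['/'] <+: rest.toList) := by
        rcases (pvMem_cuts rest c).mp (by rw [← hcutsdef]; exact hc) with hcl | ⟨k, rfl, hk, hgk⟩
        · exact ⟨rest.toList.length, hcl, le_refl _, Or.inl (by simp)⟩
        · refine ⟨k, rfl, le_of_lt hk, Or.inr ?_⟩
          have hts : rest.toList.take (k+1) = rest.toList.take k ++ ['/'] := by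
            rw [List.take_add_one, hgk]
            rfl
          rw [← hts]
          exact List.take_prefix _ _
      subst hck
      set ss := PySem.Str.slice rest none (some (k : Int)) with hssdef
      clear_value ss
      have hssl : ss.toList = rest.toList.take k := by
        rw [hssdef]; exact pvSlice_toList rest k
      have hsslen : ss.toList.length = k := by
        rw [hssl, List.length_take]
        omega
      have hmem : (ss, i) ∈ pvSuffixItems := (pvGet_eq_some_iff _ _).mp hhit
      have hge : ("/api/" ++ ss, PySem.List.pyGetD pvScreens i "") ∈ pvRawTable := by
        rw [pvCorr]
        exact List.mem_map.mpr ⟨(ss, i), hmem, rfl⟩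
      have hmatch : pvMatch p ("/api/" ++ ss) = true := by
        apply (pvMatch_iff_boundary p rest ss hp5).mpr
        rw [hssl]
        exact hbk
      have hmaxraw : ∀ g ∈ pvRawTable, pvMatch p g.1 = true →
          PySem.Str.len g.1 ≤ PySem.Str.len ("/api/" ++ ss) := by
        intro g hg hmg
        rcases pvRaw_decomp g hg with ⟨s', i', hm', hg1, _⟩
        have hb := (pvMatch_iff_boundary p rest s' hp5).mp (by rwa [hg1] at hmg)
        rcases pvBoundary_hit rest s' i' hm' hb with ⟨hc', hhit'⟩
        have hle : (s'.toList.length : Int) ≤ (k : Int) := by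
          by_contra hgt
          rw [not_le] at hgt
          have hmiss' := hmax _ (by rw [← hcutsdef] at hc'; exact hc') hgt
          rw [hmiss'] at hhit'
          simp at hhit'
        rw [hg1, pvLenKey, pvLenKey, hsslen]
        omega
      have hpair : pvSortedApiPrefixes.Pairwise
          (fun a b => PySem.Str.len b.1 ≤ PySem.Str.len a.1) :=
        PySem.List.sorted_pairwise_rev pvRawTable (fun x => PySem.Str.len x.1)
      have hexists : ∃ e ∈ pvSortedApiPrefixes, pvMatch p e.1 = true :=
        ⟨_, (PySem.List.mem_sorted _ _ _ _).mpr hge, hmatch⟩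
      rcases pvFirstMatch_max p _ hpair hexists with ⟨f, hf, hmf, hfm, hfmax⟩
      have hmemf : f ∈ pvRawTable := (PySem.List.mem_sorted _ _ _ _).mp hf
      have hmemge : ("/api/" ++ ss, PySem.List.pyGetD pvScreens i "") ∈ pvSortedApiPrefixes :=
        (PySem.List.mem_sorted _ _ _ _).mpr hge
      have h1 : PySem.Str.len f.1 ≤ PySem.Str.len ("/api/" ++ ss) := hmaxraw f hmemf hmf
      have h2 : PySem.Str.len ("/api/" ++ ss) ≤ PySem.Str.len f.1 := hfmax _ hmemge hmatch
      have hflen : PySem.Str.len f.1 = PySem.Str.len ("/api/" ++ ss) := le_antisymm h1 h2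
      have hfkey : f.1 = "/api/" ++ ss := pvMatch_len_inj hmf hmatch hflen
      have hfeq : f = ("/api/" ++ ss, PySem.List.pyGetD pvScreens i "") :=
        List.inj_on_of_nodup_map pvNodupRaw hmemf hge hfkey
      rw [hcutsdef] at hloop
      rw [hfm, hfeq]
      simp only [hloop]
      rw [hv]
      simp
  · -- p does not start with "/api/"
    have hstf : PySem.Str.startswith p "/api/" = false := Bool.eq_false_iff.mpr hst
    have hnone : pvFirstMatch p pvSortedApiPrefixes = none := by
      rw [pvFirstMatch_eq_none_iff]
      intro e he
      apply Bool.eq_false_iff.mpr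
      intro hme
      apply hst
      rw [PySem.Str.startswith_eq]
      apply (PySem.Chars.startswith_iff _ _).mpr
      exact (pvRaw_api e ((PySem.List.mem_sorted _ _ _ _).mp he)).trans (pvMatch_prefix hme)
    rw [hnone, hstf]
    simp

-- ===== VERDICT (by name: the statement is the Claim_ definition above) =====
theorem api_path_to_screen_id_spec : Claim_equal_api_path_to_screen_id := by
  intro api_path _
  unfold Spec_api_path_to_screen_id
  unfold api_path_to_screen_id api_path_to_screen_id_alt
  rw [pvNorm_eq]
  exact pvTail_eq (normalize_applyfy_path api_path)
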